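-- pv_equiv track=rewrite | github.com/odysseyalive/krull-ai | proxy/sse_patch.py | _resolve_lang_books
-- ===== SOURCE A (Python) =====
-- def _resolve_lang_books(prefixes: tuple[str, ...], catalog: list[str]) -> list[str]:
--     """Resolve a tuple of unsuffixed ZIM prefixes against the catalog list
--     of full suffixed names. Order is preserved from the prefix tuple. If
--     multiple catalog entries match a prefix (rare — older + newer copies
--     of the same ZIM), the first one wins."""
--     out: list[str] = []
--     for prefix in prefixes:
--         for book in catalog:
--             if book == prefix or book.startswith(prefix + "_"):
--                 out.append(book)
--                 break
--     return out
-- ===== SOURCE B (Python) =====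
-- def _resolve_lang_books(prefixes, catalog):
--     """Resolve unsuffixed ZIM prefixes against the catalog of full suffixed
--     names, preserving prefix order; first catalog match wins.
--
--     One pass over the catalog builds an index mapping every key a book can
--     match (the book itself and each underscore-boundary prefix of it) to the
--     first book carrying that key; then each prefix is a single dict lookup.
--     """
--     index = {}
--     for book in catalog:
--         index.setdefault(book, book)
--         for i, ch in enumerate(book):
--             if ch == "_":
--                 index.setdefault(book[:i], book)
--     out = []
--     for p in prefixes:
--         b = index.get(p)
--         if b is not None:
--             out.append(b)
--     return out
-- ===== Notes on version B (the rewrite author's own statement) =====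
-- stated objective: faster
-- what changed: Instead of scanning the whole catalog for every prefix, B builds in one pass a dict mapping each book and each of its underscore-boundary prefixes to the first book with that key, then resolves each prefix by a single dict lookup.
import Mathlib
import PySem

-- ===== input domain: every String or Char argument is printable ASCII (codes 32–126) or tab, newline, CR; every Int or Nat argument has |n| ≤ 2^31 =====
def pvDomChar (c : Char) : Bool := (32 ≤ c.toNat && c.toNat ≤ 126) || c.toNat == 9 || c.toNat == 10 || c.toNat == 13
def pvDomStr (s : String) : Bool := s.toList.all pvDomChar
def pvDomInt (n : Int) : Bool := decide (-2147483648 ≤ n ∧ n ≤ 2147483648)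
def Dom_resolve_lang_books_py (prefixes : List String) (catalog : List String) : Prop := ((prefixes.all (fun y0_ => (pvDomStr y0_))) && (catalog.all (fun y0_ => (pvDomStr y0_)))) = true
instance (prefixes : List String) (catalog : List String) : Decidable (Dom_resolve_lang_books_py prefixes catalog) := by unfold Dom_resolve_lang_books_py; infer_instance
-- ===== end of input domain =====

-- B replaces A's per-prefix catalog scan by a one-pass dict of underscore-boundary keys (first book wins), then dict lookups.

-- ===== PORT A =====
-- inner 'for book in catalog: … break' loop: returns the first matching book, none if no break fired
def aFind (pre : String) : List String → Option String
  | [] => none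
  | book :: rest =>
    if book == pre || PySem.Str.startswith book (pre ++ "_") then some book
    else aFind pre rest

def resolve_lang_books_py (prefixes : List String) (catalog : List String) : List String :=
  prefixes.foldl (fun out p =>
    match aFind p catalog with
    | some book => out ++ [book]
    | none => out) []

-- ===== PORT B =====
-- index.setdefault(book, book); then for i, ch in enumerate(book): if ch == "_": index.setdefault(book[:i], book)
-- book[:i] with i an enumerate index (0 ≤ i ≤ len) is exactly take i of the character list
def altIndexBook (d : PySem.Dict String String) (book : String) : PySem.Dict String String :=
  (PySem.List.enumerate book.toList).foldl
    (fun d p => if p.2 = '_' then PySem.Dict.setdefault d (String.ofList (book.toList.take p.1.toNat)) book else d)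
    (PySem.Dict.setdefault d book book)

def resolve_lang_books_py_alt (prefixes : List String) (catalog : List String) : List String :=
  let index := catalog.foldl altIndexBook PySem.Dict.empty
  prefixes.foldl (fun out p =>
    match PySem.Dict.get? index p with
    | some b => out ++ [b]
    | none => out) []

-- ===== PRECONDITION & SPEC =====
def Spec_resolve_lang_books_py (prefixes : List String) (catalog : List String) (out : List String) : Prop := out = resolve_lang_books_py_alt prefixes catalog
instance (prefixes : List String) (catalog : List String) (out : List String) : Decidable (Spec_resolve_lang_books_py prefixes catalog out) := by unfold Spec_resolve_lang_books_py; infer_instance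

-- ===== CLAIM (what is proved, stated in full; the proofs are below) =====
def Claim_equal_resolve_lang_books_py : Prop := ∀ (prefixes : List String) (catalog : List String), Dom_resolve_lang_books_py prefixes catalog → Spec_resolve_lang_books_py prefixes catalog (resolve_lang_books_py prefixes catalog)

-- ===== LEMMAS AND PROOFS =====

-- membership in PySem.List.enumerate
theorem mem_enumerate_iff {α : Type} (xs : List α) (s : Int) (p : Int × α) :
    p ∈ PySem.List.enumerate xs s ↔ ∃ k : Nat, ∃ h : k < xs.length, p = (s + k, xs[k]) := by
  induction xs generalizing s with
  | nil => simp [PySem.List.enumerate]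
  | cons x t ih =>
    rw [PySem.List.enumerate_cons]
    simp only [List.mem_cons, ih]
    constructor
    · rintro (rfl | ⟨k, hk, rfl⟩)
      · exact ⟨0, by simp, by simp⟩
      · exact ⟨k+1, by simpa using hk, by push_cast; simp; ring_nf⟩
    · rintro ⟨k, hk, rfl⟩
      cases k with
      | zero => left; simp
      | succ k => right; exact ⟨k, by simpa using hk, by push_cast; simp; ring_nf⟩

-- get? after setdefault: the old binding wins, a new key is appended
theorem get?_setdefault (d : PySem.Dict String String) (k v q : String) :
    (PySem.Dict.setdefault d k v).get? q = (d.get? q).or (if q = k then some v else none) := by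
  by_cases hc : d.contains k = true
  · rw [show PySem.Dict.setdefault d k v = d by unfold PySem.Dict.setdefault; simp [hc]]
    by_cases hq : q = k
    · subst hq
      rw [PySem.Dict.contains_eq_isSome_get?] at hc
      cases hg : d.get? q with
      | none => rw [hg] at hc; simp at hc
      | some w => simp
    · simp [hq]
  · rw [show PySem.Dict.setdefault d k v = ⟨d.items ++ [(k, v)]⟩ by unfold PySem.Dict.setdefault; simp [hc]]
    simp only [PySem.Dict.get?, List.find?_append, Option.map_or]
    congr 1
    by_cases hq : q = k <;> simp [List.find?, hq]
    rw [show (k == q) = false by simp; exact fun h => hq h.symm]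

-- B's inner loop over any pair list: appends book for the loop's keys unless q is already bound
theorem get?_foldl_setdefault (ps : List (Int × Char)) (book : String) (d : PySem.Dict String String) (q : String) :
    (ps.foldl (fun d p => if p.2 = '_' then PySem.Dict.setdefault d (String.ofList (book.toList.take p.1.toNat)) book else d) d).get? q
    = (d.get? q).or (if ps.any (fun p => p.2 = '_' ∧ String.ofList (book.toList.take p.1.toNat) = q) then some book else none) := by
  induction ps generalizing d with
  | nil => simp
  | cons p ps ih =>
    rw [List.foldl_cons, ih]
    by_cases h1 : p.2 = '_'
    · rw [if_pos h1, get?_setdefault, Option.or_assoc]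
      congr 1
      rw [List.any_cons]
      by_cases h2 : String.ofList (book.toList.take p.1.toNat) = q
      · rw [if_pos h2.symm,
          show decide (p.2 = '_' ∧ String.ofList (List.take p.1.toNat book.toList) = q) = true from by simp [h1, h2]]
        simp
      · rw [if_neg (Ne.symm h2),
          show decide (p.2 = '_' ∧ String.ofList (List.take p.1.toNat book.toList) = q) = false from by simp [h2]]
        rw [Bool.false_or, Option.none_or]
    · rw [if_neg h1]
      congr 1
      rw [List.any_cons,
        show decide (p.2 = '_' ∧ String.ofList (List.take p.1.toNat book.toList) = q) = false from by simp [h1]]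
      rw [Bool.false_or]

-- A's match condition ↔ q is one of the keys B records for book
theorem match_iff_key (q book : String) :
    (book == q || PySem.Str.startswith book (q ++ "_")) = true
    ↔ (book = q ∨ ∃ k : Nat, ∃ h : k < book.toList.length, book.toList[k] = '_' ∧ String.ofList (book.toList.take k) = q) := by
  rw [Bool.or_eq_true, beq_iff_eq]
  apply or_congr Iff.rfl
  rw [PySem.Str.startswith_eq, PySem.Chars.startswith_iff,
    show (q ++ "_").toList = q.toList ++ ['_'] by simp]
  constructor
  · rintro ⟨t, ht⟩
    have hL : book.toList = q.toList ++ '_' :: t := by rw [← ht]; simp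
    refine ⟨q.toList.length, by simp [hL], ?_, ?_⟩
    · simp [hL]
    · rw [hL]
      simp
  · rintro ⟨k, hk, hus, htake⟩
    have h1 : q.toList = book.toList.take k := by rw [← htake]; simp
    refine ⟨book.toList.drop (k+1), ?_⟩
    rw [h1, show book.toList.take k ++ ['_'] = book.toList.take (k+1) by
      rw [List.take_add_one]; congr 1; simp [List.getElem?_eq_getElem hk, hus]]
    exact List.take_append_drop (k+1) book.toList

-- one book of B's index-building pass = one test of A's inner loop
theorem get?_altIndexBook (d : PySem.Dict String String) (book q : String) :
    (altIndexBook d book).get? q = (d.get? q).or (if (book == q || PySem.Str.startswith book (q ++ "_")) then some book else none) := by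
  unfold altIndexBook
  rw [get?_foldl_setdefault, get?_setdefault, Option.or_assoc]
  congr 1
  have hany : (PySem.List.enumerate book.toList).any
      (fun p => p.2 = '_' ∧ String.ofList (book.toList.take p.1.toNat) = q) = true
      ↔ ∃ k : Nat, ∃ h : k < book.toList.length, book.toList[k] = '_' ∧ String.ofList (book.toList.take k) = q := by
    rw [List.any_eq_true]
    constructor
    · rintro ⟨p, hp, hpred⟩
      obtain ⟨k, hk, rfl⟩ := (mem_enumerate_iff book.toList 0 p).1 hp
      simp only [zero_add, decide_eq_true_eq] at hpred
      refine ⟨k, hk, hpred.1, ?_⟩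
      have : ((k : Int)).toNat = k := Int.toNat_natCast k
      rw [← this]; exact hpred.2
    · rintro ⟨k, hk, hus, htake⟩
      refine ⟨((k : Int), book.toList[k]), (mem_enumerate_iff book.toList 0 _).2 ⟨k, hk, by simp⟩, ?_⟩
      simp [hus, Int.toNat_natCast, htake]
  by_cases h1 : book = q
  · rw [if_pos (h1.symm), show (book == q || PySem.Str.startswith book (q ++ "_")) = true from
      (match_iff_key q book).2 (Or.inl h1)]
    simp
  · rw [if_neg (fun h => h1 h.symm), Option.none_or]
    by_cases h2 : ∃ k : Nat, ∃ h : k < book.toList.length, book.toList[k] = '_' ∧ String.ofList (book.toList.take k) = q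
    · rw [if_pos (hany.2 h2), show (book == q || PySem.Str.startswith book (q ++ "_")) = true from
        (match_iff_key q book).2 (Or.inr h2)]
      simp
    · rw [if_neg (fun h => h2 (hany.1 h)),
        show (book == q || PySem.Str.startswith book (q ++ "_")) = false from by
          rw [← Bool.not_eq_true, match_iff_key]; exact fun h => h.elim h1 h2]
      simp

-- B's whole index against A's inner scan
theorem get?_index (catalog : List String) (d : PySem.Dict String String) (q : String) :
    (catalog.foldl altIndexBook d).get? q = (d.get? q).or (aFind q catalog) := by
  induction catalog generalizing d with
  | nil => simp [aFind]
  | cons book rest ih =>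
    rw [List.foldl_cons, ih, get?_altIndexBook, Option.or_assoc]
    congr 1
    rw [show aFind q (book :: rest)
        = if (book == q || PySem.Str.startswith book (q ++ "_")) then some book else aFind q rest from rfl]
    by_cases hm : (book == q || PySem.Str.startswith book (q ++ "_")) = true
    · rw [if_pos hm, if_pos hm, Option.some_or]
    · rw [if_neg hm, if_neg hm, Option.none_or]

-- ===== VERDICT (by name: the statement is the Claim_ definition above) =====
theorem resolve_lang_books_py_spec : Claim_equal_resolve_lang_books_py := by
  intro prefixes catalog _
  unfold Spec_resolve_lang_books_py resolve_lang_books_py resolve_lang_books_py_alt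
  have h : ∀ q, (catalog.foldl altIndexBook PySem.Dict.empty).get? q = aFind q catalog := by
    intro q; rw [get?_index]; simp [pysem]
  simp only [h]
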